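-- pv_equiv track=rewrite | github.com/JLee21/tech-prep | code-problems/search-problems/box-roi.py | searchDFS
-- ===== SOURCE A (Python) =====
-- def searchDFS(row, col, grid, coords):
--     # check bounds
--     if row < 0 or row > len(grid)-1:
--         return
--     if col < 0 or col > len(grid[0])-1:
--         return
--     # check if visited
--     if grid[row][col] == 1:
--         return
--
--     # mark as visited
--     grid[row][col] = 1
--
--     # cache the possible bottom right coord
--     if row+col > coords['br'][0]+coords['br'][1]:
--         coords['br'] = (row, col)
--
--     # continue to search nearest neighbors
--     searchDFS(row-1, col, grid, coords)  # left
--     searchDFS(row+1, col, grid, coords)  # right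
--     searchDFS(row, col+1, grid, coords)  # down
--     searchDFS(row, col-1, grid, coords)  # up
--
--     # if we reached this far, we have exhausted the DFS search
--     return coords
-- ===== SOURCE B (Python) =====
-- def searchDFS(row, col, grid, coords):
--     # Iterative DFS with an explicit stack (same preorder as the recursion:
--     # pop order left, right, down, up). Mutates grid and coords in place like A.
--     if row < 0 or row > len(grid) - 1:
--         return
--     if col < 0 or col > len(grid[0]) - 1:
--         return
--     if grid[row][col] == 1:
--         return
--
--     ncols = len(grid[0])
--     stack = [(row, col)]
--     while stack:
--         r, c = stack.pop()
--         if r < 0 or r >= len(grid) or c < 0 or c >= ncols: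
--             continue
--         if grid[r][c] == 1:
--             continue
--         grid[r][c] = 1
--         if r + c > coords['br'][0] + coords['br'][1]:
--             coords['br'] = (r, c)
--         # push in reverse of A's visit order: up, down, right, left
--         stack.append((r, c - 1))
--         stack.append((r, c + 1))
--         stack.append((r + 1, c))
--         stack.append((r - 1, c))
--     return coords
-- ===== Notes on version B (the rewrite author's own statement) =====
-- stated objective: alternative
-- what changed: The recursive flood fill is replaced by an iterative DFS with an explicit stack (neighbours pushed in reverse so the pop order reproduces A's left/right/down/up preorder and hence the same strict-'>' bottom-right updates).
-- outside the precondition, e.g. on searchDFS(0, 0, [[0], [1], []], {'br': (0, 0)}): A returns {'br': (0, 0)}, B returns {'br': (0, 0)}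
import Mathlib
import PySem

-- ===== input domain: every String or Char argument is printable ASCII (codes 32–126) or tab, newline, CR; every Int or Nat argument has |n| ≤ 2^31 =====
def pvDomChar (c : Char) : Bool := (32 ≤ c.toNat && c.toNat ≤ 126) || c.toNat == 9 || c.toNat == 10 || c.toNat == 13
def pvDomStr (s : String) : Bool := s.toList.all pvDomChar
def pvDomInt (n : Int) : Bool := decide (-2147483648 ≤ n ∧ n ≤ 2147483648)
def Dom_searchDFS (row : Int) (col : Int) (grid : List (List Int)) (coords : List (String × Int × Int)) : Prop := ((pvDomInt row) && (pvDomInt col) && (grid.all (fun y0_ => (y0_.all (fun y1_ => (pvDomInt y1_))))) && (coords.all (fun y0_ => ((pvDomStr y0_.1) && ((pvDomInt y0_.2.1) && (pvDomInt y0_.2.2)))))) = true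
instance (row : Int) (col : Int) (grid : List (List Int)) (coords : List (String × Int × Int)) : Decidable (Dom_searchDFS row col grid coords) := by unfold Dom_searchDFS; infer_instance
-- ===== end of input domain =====

-- B rewrites A's recursive flood fill as an iterative DFS with an explicit stack (same
-- preorder, so the same strict-'>' bottom-right updates); equivalence is about the RETURN
-- value (both Pythons also mutate grid/coords in place, in the same way).

-- ===== PORT A =====
-- grid[r][c] read: none where Python raises IndexError (excluded by Pre_)
def getCell (g : List (List Int)) (r c : Int) : Option Int :=
  (PySem.List.pyGet? g r).bind (fun rw => PySem.List.pyGet? rw c)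

-- grid[r][c] = 1 (only executed after A's/B's bounds checks, so 0 ≤ r, c)
def setCell (g : List (List Int)) (r c : Int) : List (List Int) :=
  g.set r.toNat ((g.getD r.toNat []).set c.toNat 1)

-- number of unvisited (≠ 1) cells; fuel bound for the recursion/loop
def nzCount (g : List (List Int)) : Nat :=
  (g.map (fun rw => rw.countP (fun v => decide (v ≠ 1)))).sum

-- the recursive DFS of A, step for step; returns (grid, coords, reached-the-end?).
-- fuel only makes the recursion structural; searchDFS passes enough (nzCount grid + 1).
def dfsA (fuel : Nat) (row col : Int) (g : List (List Int))
    (co : PySem.Dict String (Int × Int)) :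
    List (List Int) × PySem.Dict String (Int × Int) × Bool :=
  match fuel with
  | 0 => (g, co, false)
  | fuel + 1 =>
    if row < 0 ∨ row > (g.length : Int) - 1 then (g, co, false)
    else if col < 0 ∨ col > ((g.headD []).length : Int) - 1 then (g, co, false)
    else match getCell g row col with
      | none => (g, co, false)          -- Python raises IndexError here (outside Pre_)
      | some v =>
        if v = 1 then (g, co, false)
        else
          match co.get? "br" with
          | none => (setCell g row col, co, false)   -- Python raises KeyError (outside Pre_)
          | some br =>
            let g1 := setCell g row col
            let co1 := if row + col > br.1 + br.2 then co.insert "br" (row, col) else co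
            let s1 := dfsA fuel (row - 1) col g1 co1
            let s2 := dfsA fuel (row + 1) col s1.1 s1.2.1
            let s3 := dfsA fuel row (col + 1) s2.1 s2.2.1
            let s4 := dfsA fuel row (col - 1) s3.1 s3.2.1
            (s4.1, s4.2.1, true)

def searchDFS (row : Int) (col : Int) (grid : List (List Int)) (coords : List (String × Int × Int)) : Option (List (String × Int × Int)) :=
  let res := dfsA (nzCount grid + 1) row col grid (PySem.Dict.ofList coords)
  if res.2.2 then some res.2.1.items else none

-- ===== PORT B =====
-- the while-loop of Source B; pops a cell, marks it, pushes the four neighbours.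
-- fuel only makes the loop structural; searchDFS_alt passes enough.
def loopB (fuel : Nat) (g : List (List Int)) (co : PySem.Dict String (Int × Int))
    (ncols : Int) (stack : List (Int × Int)) :
    List (List Int) × PySem.Dict String (Int × Int) :=
  match fuel, stack with
  | _, [] => (g, co)
  | 0, _ :: _ => (g, co)
  | fuel + 1, (r, c) :: rest =>
    if r < 0 ∨ r ≥ (g.length : Int) ∨ c < 0 ∨ c ≥ ncols then loopB fuel g co ncols rest
    else match getCell g r c with
      | none => (g, co)                 -- Python raises IndexError here (outside Pre_)
      | some v =>
        if v = 1 then loopB fuel g co ncols rest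
        else
          match co.get? "br" with
          | none => (setCell g r c, co) -- Python raises KeyError (outside Pre_)
          | some br =>
            let g1 := setCell g r c
            let co1 := if r + c > br.1 + br.2 then co.insert "br" (r, c) else co
            loopB fuel g1 co1 ncols
              ((r - 1, c) :: (r + 1, c) :: (r, c + 1) :: (r, c - 1) :: rest)

def searchDFS_alt (row : Int) (col : Int) (grid : List (List Int)) (coords : List (String × Int × Int)) : Option (List (String × Int × Int)) :=
  if row < 0 ∨ row > (grid.length : Int) - 1 then none
  else if col < 0 ∨ col > ((grid.headD []).length : Int) - 1 then none
  else match getCell grid row col with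
    | none => none                      -- Python raises IndexError here (outside Pre_)
    | some v =>
      if v = 1 then none
      else
        let res := loopB (1 + 4 * nzCount grid + 1) grid (PySem.Dict.ofList coords)
          ((grid.headD []).length : Int) [(row, col)]
        some res.2.items

-- ===== PRECONDITION & SPEC =====
-- Pre_ excludes the inputs on which A raises: a start cell whose row is too short
-- (IndexError), and — when the fill actually starts — a coords without key 'br'
-- (KeyError) or a grid with a row shorter than row 0 (the DFS may index past its end);
-- the shape condition is conservative, so a few ragged grids on which A happens to
-- return (the short row is never reached) are excluded too.
def Pre_searchDFS (row : Int) (col : Int) (grid : List (List Int)) (coords : List (String × Int × Int)) : Prop :=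
  (0 ≤ row ∧ row < (grid.length : Int) ∧ 0 ≤ col ∧ col < ((grid.headD []).length : Int)) →
    (col < ((grid.getD row.toNat []).length : Int) ∧
      (getCell grid row col = some 1 ∨
        ((∀ rw ∈ grid, (grid.headD []).length ≤ rw.length) ∧
          (PySem.Dict.ofList coords).contains "br" = true)))
instance (row : Int) (col : Int) (grid : List (List Int)) (coords : List (String × Int × Int)) : Decidable (Pre_searchDFS row col grid coords) := by unfold Pre_searchDFS; infer_instance

def pvWitness_searchDFS : Int × Int × List (List Int) × (List (String × Int × Int)) :=
  (0, 0, [[0, 0], [0, 1]], [("br", (0, 0))])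

def Spec_searchDFS (row : Int) (col : Int) (grid : List (List Int)) (coords : List (String × Int × Int)) (out : Option (List (String × Int × Int))) : Prop := out = searchDFS_alt row col grid coords
instance (row : Int) (col : Int) (grid : List (List Int)) (coords : List (String × Int × Int)) (out : Option (List (String × Int × Int))) : Decidable (Spec_searchDFS row col grid coords out) := by unfold Spec_searchDFS; infer_instance

-- ===== CLAIM (what is proved, stated in full; the proofs are below) =====
def Claim_equal_searchDFS : Prop := ∀ (row : Int) (col : Int) (grid : List (List Int)) (coords : List (String × Int × Int)), Dom_searchDFS row col grid coords → Pre_searchDFS row col grid coords → Spec_searchDFS row col grid coords (searchDFS row col grid coords)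

-- ===== LEMMAS AND PROOFS =====
-- ----- unfolding equations for dfsA (source-syntax, used throughout) -----

lemma dfsA_oob (f : Nat) (r c : Int) (g : List (List Int)) (co : PySem.Dict String (Int × Int))
    (h1 : r < 0 ∨ r > (g.length : Int) - 1) :
    dfsA (f + 1) r c g co = (g, co, false) := by
  conv_lhs => rw [dfsA]
  rw [if_pos h1]

lemma dfsA_oobc (f : Nat) (r c : Int) (g : List (List Int)) (co : PySem.Dict String (Int × Int))
    (h1 : ¬(r < 0 ∨ r > (g.length : Int) - 1))
    (h2 : c < 0 ∨ c > ((g.headD []).length : Int) - 1) :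
    dfsA (f + 1) r c g co = (g, co, false) := by
  conv_lhs => rw [dfsA]
  rw [if_neg h1, if_pos h2]

lemma dfsA_none (f : Nat) (r c : Int) (g : List (List Int)) (co : PySem.Dict String (Int × Int))
    (h1 : ¬(r < 0 ∨ r > (g.length : Int) - 1))
    (h2 : ¬(c < 0 ∨ c > ((g.headD []).length : Int) - 1))
    (hget : getCell g r c = none) :
    dfsA (f + 1) r c g co = (g, co, false) := by
  conv_lhs => rw [dfsA]
  rw [if_neg h1, if_neg h2, hget]

lemma dfsA_visited (f : Nat) (r c : Int) (g : List (List Int)) (co : PySem.Dict String (Int × Int))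
    (h1 : ¬(r < 0 ∨ r > (g.length : Int) - 1))
    (h2 : ¬(c < 0 ∨ c > ((g.headD []).length : Int) - 1))
    (hget : getCell g r c = some 1) :
    dfsA (f + 1) r c g co = (g, co, false) := by
  conv_lhs => rw [dfsA]
  rw [if_neg h1, if_neg h2, hget]
  dsimp only
  rw [if_pos rfl]

lemma dfsA_nobr (f : Nat) (r c : Int) (g : List (List Int)) (co : PySem.Dict String (Int × Int))
    (v : Int)
    (h1 : ¬(r < 0 ∨ r > (g.length : Int) - 1))
    (h2 : ¬(c < 0 ∨ c > ((g.headD []).length : Int) - 1))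
    (hget : getCell g r c = some v) (hv : ¬ v = 1)
    (hbr : co.get? "br" = none) :
    dfsA (f + 1) r c g co = (setCell g r c, co, false) := by
  conv_lhs => rw [dfsA]
  rw [if_neg h1, if_neg h2, hget]
  dsimp only
  rw [if_neg hv, hbr]

lemma dfsA_deep (f : Nat) (r c : Int) (g : List (List Int)) (co : PySem.Dict String (Int × Int))
    (v : Int) (br : Int × Int)
    (h1 : ¬(r < 0 ∨ r > (g.length : Int) - 1))
    (h2 : ¬(c < 0 ∨ c > ((g.headD []).length : Int) - 1))
    (hget : getCell g r c = some v) (hv : ¬ v = 1)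
    (hbr : co.get? "br" = some br) :
    dfsA (f + 1) r c g co =
      (let g1 := setCell g r c
       let co1 := if r + c > br.1 + br.2 then co.insert "br" (r, c) else co
       let s1 := dfsA f (r - 1) c g1 co1
       let s2 := dfsA f (r + 1) c s1.1 s1.2.1
       let s3 := dfsA f r (c + 1) s2.1 s2.2.1
       let s4 := dfsA f r (c - 1) s3.1 s3.2.1
       (s4.1, s4.2.1, true)) := by
  conv_lhs => rw [dfsA]
  rw [if_neg h1, if_neg h2, hget]
  dsimp only
  rw [if_neg hv, hbr]

-- ----- unfolding equations for loopB -----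

lemma loopB_nil (f : Nat) (g : List (List Int)) (co : PySem.Dict String (Int × Int)) (ncols : Int) :
    loopB f g co ncols [] = (g, co) := by
  cases f <;> rfl

lemma loopB_skip (f : Nat) (g : List (List Int)) (co : PySem.Dict String (Int × Int))
    (ncols r c : Int) (rest : List (Int × Int))
    (h : r < 0 ∨ r ≥ (g.length : Int) ∨ c < 0 ∨ c ≥ ncols) :
    loopB (f + 1) g co ncols ((r, c) :: rest) = loopB f g co ncols rest := by
  conv_lhs => rw [loopB]
  rw [if_pos h]

lemma loopB_visited (f : Nat) (g : List (List Int)) (co : PySem.Dict String (Int × Int))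
    (ncols r c : Int) (rest : List (Int × Int))
    (h : ¬(r < 0 ∨ r ≥ (g.length : Int) ∨ c < 0 ∨ c ≥ ncols))
    (hget : getCell g r c = some 1) :
    loopB (f + 1) g co ncols ((r, c) :: rest) = loopB f g co ncols rest := by
  conv_lhs => rw [loopB]
  rw [if_neg h, hget]
  dsimp only
  rw [if_pos rfl]

lemma loopB_deep (f : Nat) (g : List (List Int)) (co : PySem.Dict String (Int × Int))
    (ncols r c : Int) (rest : List (Int × Int)) (v : Int) (br : Int × Int)
    (h : ¬(r < 0 ∨ r ≥ (g.length : Int) ∨ c < 0 ∨ c ≥ ncols))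
    (hget : getCell g r c = some v) (hv : ¬ v = 1)
    (hbr : co.get? "br" = some br) :
    loopB (f + 1) g co ncols ((r, c) :: rest) =
      loopB f (setCell g r c)
        (if r + c > br.1 + br.2 then co.insert "br" (r, c) else co) ncols
        ((r - 1, c) :: (r + 1, c) :: (r, c + 1) :: (r, c - 1) :: rest) := by
  conv_lhs => rw [loopB]
  rw [if_neg h, hget]
  dsimp only
  rw [if_neg hv, hbr]

-- ----- basic facts about the marking step -----

lemma setCell_map_length (g : List (List Int)) (r c : Int) :
    (setCell g r c).map List.length = g.map List.length := by
  unfold setCell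
  rw [List.map_set]
  rcases lt_or_ge r.toNat g.length with h | h
  · rw [List.getD_eq_getElem _ _ h, List.length_set]
    have hh : r.toNat < (g.map List.length).length := by simpa using h
    have : g[r.toNat].length = (g.map List.length)[r.toNat]'hh := (List.getElem_map _).symm
    rw [this, List.set_getElem_self]
  · rw [List.set_eq_of_length_le (by simpa using h)]

lemma nzCount_setCell (g : List (List Int)) (r c : Int) (v : Int)
    (h0r : 0 ≤ r) (h0c : 0 ≤ c) (hget : getCell g r c = some v) (hv : v ≠ 1) :
    nzCount (setCell g r c) + 1 = nzCount g := by
  unfold getCell at hget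
  rw [PySem.List.pyGet?_of_nonneg _ h0r] at hget
  rcases hrow : g[r.toNat]? with _ | rw0
  · rw [hrow] at hget; simp at hget
  · rw [hrow] at hget
    simp only [Option.bind_some] at hget
    rw [PySem.List.pyGet?_of_nonneg _ h0c] at hget
    have hn : r.toNat < g.length := (List.getElem?_eq_some_iff.mp hrow).1
    have hgn : g[r.toNat] = rw0 := (List.getElem?_eq_some_iff.mp hrow).2
    have hm : c.toNat < rw0.length := (List.getElem?_eq_some_iff.mp hget).1
    have hvm : rw0[c.toNat] = v := (List.getElem?_eq_some_iff.mp hget).2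
    unfold setCell nzCount
    rw [List.getD_eq_getElem _ _ hn, hgn]
    rw [List.set_eq_take_append_cons_drop, if_pos hn]
    conv_rhs => rw [show g = g.take r.toNat ++ g[r.toNat] :: g.drop (r.toNat + 1) by
      rw [List.getElem_cons_drop, List.take_append_drop]]
    rw [hgn]
    simp only [List.map_append, List.map_cons, List.sum_append, List.sum_cons]
    have hrow_eq : (rw0.set c.toNat 1).countP (fun v => decide (v ≠ 1)) + 1
        = rw0.countP (fun v => decide (v ≠ 1)) := by
      rw [List.set_eq_take_append_cons_drop, if_pos hm]
      conv_rhs => rw [show rw0 = rw0.take c.toNat ++ rw0[c.toNat] :: rw0.drop (c.toNat + 1) by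
        rw [List.getElem_cons_drop, List.take_append_drop]]
      rw [hvm]
      simp only [List.countP_append, List.countP_cons]
      simp [hv]
      omega
    omega

-- a cell inside the checked bounds of a long-enough row can be read
lemma getCell_isSome (g : List (List Int)) (r c : Int)
    (h0r : 0 ≤ r) (hr : r < (g.length : Int)) (h0c : 0 ≤ c)
    (hc : c < ((g.getD r.toNat []).length : Int)) :
    ∃ v, getCell g r c = some v := by
  unfold getCell
  rw [PySem.List.pyGet?_of_nonneg _ h0r]
  have hn : r.toNat < g.length := by omega
  rw [List.getElem?_eq_getElem hn]
  simp only [Option.bind_some]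
  rw [PySem.List.pyGet?_of_nonneg _ h0c]
  have hm : c.toNat < g[r.toNat].length := by
    rw [List.getD_eq_getElem _ _ hn] at hc; omega
  exact ⟨_, List.getElem?_eq_getElem hm⟩

-- shape transfer along a map-length equality
lemma rows_ge_of_map_length (g g' : List (List Int)) (ncols : Int)
    (h : g'.map List.length = g.map List.length)
    (hg : ∀ rw ∈ g, ncols ≤ (rw.length : Int)) :
    ∀ rw' ∈ g', ncols ≤ (rw'.length : Int) := by
  intro rw' hm
  have h1 : rw'.length ∈ g'.map List.length := List.mem_map_of_mem hm
  rw [h] at h1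
  obtain ⟨rw, hrw, hlen⟩ := List.mem_map.mp h1
  rw [← hlen]
  exact hg rw hrw

lemma headD_len_of_map_length (g g' : List (List Int))
    (h : g'.map List.length = g.map List.length) :
    (g'.headD []).length = (g.headD []).length := by
  cases g' <;> cases g <;> simp_all

-- ----- the invariants carried by dfsA -----

lemma dfsA_preserve (fuel : Nat) : ∀ (r c : Int) (g : List (List Int))
    (co : PySem.Dict String (Int × Int)),
    (dfsA fuel r c g co).1.map List.length = g.map List.length ∧
    nzCount (dfsA fuel r c g co).1 ≤ nzCount g ∧
    (dfsA fuel r c g co).2.1.contains "br" = co.contains "br" := by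
  induction fuel with
  | zero => intro r c g co; exact ⟨rfl, le_refl _, rfl⟩
  | succ f ih =>
    intro r c g co
    by_cases h1 : r < 0 ∨ r > (g.length : Int) - 1
    · rw [dfsA_oob f r c g co h1]
      exact ⟨rfl, le_refl _, rfl⟩
    by_cases h2 : c < 0 ∨ c > ((g.headD []).length : Int) - 1
    · rw [dfsA_oobc f r c g co h1 h2]
      exact ⟨rfl, le_refl _, rfl⟩
    rcases hget : getCell g r c with _ | v
    · rw [dfsA_none f r c g co h1 h2 hget]
      exact ⟨rfl, le_refl _, rfl⟩
    by_cases hv : v = 1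
    · subst hv
      rw [dfsA_visited f r c g co h1 h2 hget]
      exact ⟨rfl, le_refl _, rfl⟩
    have h0r : 0 ≤ r := by omega
    have h0c : 0 ≤ c := by omega
    have hnz := nzCount_setCell g r c v h0r h0c hget hv
    rcases hbr : co.get? "br" with _ | br
    · rw [dfsA_nobr f r c g co v h1 h2 hget hv hbr]
      exact ⟨setCell_map_length g r c, by dsimp only; omega, rfl⟩
    · rw [dfsA_deep f r c g co v br h1 h2 hget hv hbr]
      dsimp only
      set co1 := (if r + c > br.1 + br.2 then co.insert "br" (r, c) else co) with hco1
      set t1 := dfsA f (r - 1) c (setCell g r c) co1 with ht1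
      set t2 := dfsA f (r + 1) c t1.1 t1.2.1 with ht2
      set t3 := dfsA f r (c + 1) t2.1 t2.2.1 with ht3
      set t4 := dfsA f r (c - 1) t3.1 t3.2.1 with ht4
      obtain ⟨a1, b1, c1⟩ := ih (r - 1) c (setCell g r c) co1
      obtain ⟨a2, b2, c2⟩ := ih (r + 1) c t1.1 t1.2.1
      obtain ⟨a3, b3, c3⟩ := ih r (c + 1) t2.1 t2.2.1
      obtain ⟨a4, b4, c4⟩ := ih r (c - 1) t3.1 t3.2.1
      rw [← ht1] at a1 b1 c1
      rw [← ht2] at a2 b2 c2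
      rw [← ht3] at a3 b3 c3
      rw [← ht4] at a4 b4 c4
      have hcontains : co1.contains "br" = co.contains "br" := by
        rw [hco1]
        split
        · rw [PySem.Dict.contains_insert, PySem.Dict.contains_eq_isSome_get?, hbr]
          rfl
        · rfl
      refine ⟨?_, ?_, ?_⟩
      · rw [a4, a3, a2, a1, setCell_map_length]
      · have := le_trans b4 (le_trans b3 (le_trans b2 b1))
        omega
      · rw [c4, c3, c2, c1, hcontains]

-- ----- any two sufficient fuels give the same dfsA result -----

lemma dfsA_fuel (n : Nat) : ∀ (g : List (List Int)) (co : PySem.Dict String (Int × Int))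
    (r c : Int) (f1 f2 : Nat), nzCount g ≤ n → nzCount g < f1 → nzCount g < f2 →
    dfsA f1 r c g co = dfsA f2 r c g co := by
  induction n with
  | zero =>
    intro g co r c f1 f2 hn hf1 hf2
    obtain ⟨f1, rfl⟩ : ∃ k, f1 = k + 1 := ⟨f1 - 1, by omega⟩
    obtain ⟨f2, rfl⟩ : ∃ k, f2 = k + 1 := ⟨f2 - 1, by omega⟩
    by_cases h1 : r < 0 ∨ r > (g.length : Int) - 1
    · rw [dfsA_oob f1 r c g co h1, dfsA_oob f2 r c g co h1]
    by_cases h2 : c < 0 ∨ c > ((g.headD []).length : Int) - 1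
    · rw [dfsA_oobc f1 r c g co h1 h2, dfsA_oobc f2 r c g co h1 h2]
    rcases hget : getCell g r c with _ | v
    · rw [dfsA_none f1 r c g co h1 h2 hget, dfsA_none f2 r c g co h1 h2 hget]
    by_cases hv : v = 1
    · subst hv
      rw [dfsA_visited f1 r c g co h1 h2 hget, dfsA_visited f2 r c g co h1 h2 hget]
    exfalso
    have := nzCount_setCell g r c v (by omega) (by omega) hget hv
    omega
  | succ n ih =>
    intro g co r c f1 f2 hn hf1 hf2
    obtain ⟨f1, rfl⟩ : ∃ k, f1 = k + 1 := ⟨f1 - 1, by omega⟩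
    obtain ⟨f2, rfl⟩ : ∃ k, f2 = k + 1 := ⟨f2 - 1, by omega⟩
    by_cases h1 : r < 0 ∨ r > (g.length : Int) - 1
    · rw [dfsA_oob f1 r c g co h1, dfsA_oob f2 r c g co h1]
    by_cases h2 : c < 0 ∨ c > ((g.headD []).length : Int) - 1
    · rw [dfsA_oobc f1 r c g co h1 h2, dfsA_oobc f2 r c g co h1 h2]
    rcases hget : getCell g r c with _ | v
    · rw [dfsA_none f1 r c g co h1 h2 hget, dfsA_none f2 r c g co h1 h2 hget]
    by_cases hv : v = 1
    · subst hv
      rw [dfsA_visited f1 r c g co h1 h2 hget, dfsA_visited f2 r c g co h1 h2 hget]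
    have h0r : 0 ≤ r := by omega
    have h0c : 0 ≤ c := by omega
    have hnz := nzCount_setCell g r c v h0r h0c hget hv
    rcases hbr : co.get? "br" with _ | br
    · rw [dfsA_nobr f1 r c g co v h1 h2 hget hv hbr, dfsA_nobr f2 r c g co v h1 h2 hget hv hbr]
    · rw [dfsA_deep f1 r c g co v br h1 h2 hget hv hbr,
        dfsA_deep f2 r c g co v br h1 h2 hget hv hbr]
      dsimp only
      set g1 := setCell g r c with hg1
      set co1 := (if r + c > br.1 + br.2 then co.insert "br" (r, c) else co) with hco1
      have e1 : dfsA f1 (r - 1) c g1 co1 = dfsA f2 (r - 1) c g1 co1 :=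
        ih g1 co1 (r - 1) c f1 f2 (by omega) (by omega) (by omega)
      rw [e1]
      set t1 := dfsA f2 (r - 1) c g1 co1 with ht1
      have p1 := dfsA_preserve f2 (r - 1) c g1 co1
      rw [← ht1] at p1
      have e2 : dfsA f1 (r + 1) c t1.1 t1.2.1 = dfsA f2 (r + 1) c t1.1 t1.2.1 :=
        ih t1.1 t1.2.1 (r + 1) c f1 f2 (by omega) (by omega) (by omega)
      rw [e2]
      set t2 := dfsA f2 (r + 1) c t1.1 t1.2.1 with ht2
      have p2 := dfsA_preserve f2 (r + 1) c t1.1 t1.2.1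
      rw [← ht2] at p2
      have e3 : dfsA f1 r (c + 1) t2.1 t2.2.1 = dfsA f2 r (c + 1) t2.1 t2.2.1 :=
        ih t2.1 t2.2.1 r (c + 1) f1 f2 (by omega) (by omega) (by omega)
      rw [e3]
      set t3 := dfsA f2 r (c + 1) t2.1 t2.2.1 with ht3
      have p3 := dfsA_preserve f2 r (c + 1) t2.1 t2.2.1
      rw [← ht3] at p3
      have e4 : dfsA f1 r (c - 1) t3.1 t3.2.1 = dfsA f2 r (c - 1) t3.1 t3.2.1 :=
        ih t3.1 t3.2.1 r (c - 1) f1 f2 (by omega) (by omega) (by omega)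
      rw [e4]

-- ----- the bridge: one stack pop at canonical fuel is one recursive dfsA call -----

lemma bridge (n : Nat) : ∀ (g : List (List Int)) (co : PySem.Dict String (Int × Int))
    (ncols r c : Int) (rest : List (Int × Int)),
    nzCount g ≤ n →
    ((g.headD []).length : Int) = ncols →
    (∀ rw ∈ g, ncols ≤ (rw.length : Int)) →
    co.contains "br" = true →
    loopB (((r, c) :: rest).length + 4 * nzCount g + 1) g co ncols ((r, c) :: rest) =
      (let t := dfsA (nzCount g + 1) r c g co
       loopB (rest.length + 4 * nzCount t.1 + 1) t.1 t.2.1 ncols rest) := by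
  induction n with
  | zero =>
    intro g co ncols r c rest hn heq hrect hco
    by_cases h : r < 0 ∨ r ≥ (g.length : Int) ∨ c < 0 ∨ c ≥ ncols
    · rw [loopB_skip _ g co ncols r c rest h]
      by_cases h1 : r < 0 ∨ r > (g.length : Int) - 1
      · rw [dfsA_oob (nzCount g) r c g co h1]
        rw [show ((r, c) :: rest).length + 4 * nzCount g = rest.length + 4 * nzCount g + 1 by
          simp [List.length_cons]; omega]
      · have h2 : c < 0 ∨ c > ((g.headD []).length : Int) - 1 := by omega
        rw [dfsA_oobc (nzCount g) r c g co h1 h2]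
        rw [show ((r, c) :: rest).length + 4 * nzCount g = rest.length + 4 * nzCount g + 1 by
          simp [List.length_cons]; omega]
    · have h1 : ¬(r < 0 ∨ r > (g.length : Int) - 1) := by omega
      have h2 : ¬(c < 0 ∨ c > ((g.headD []).length : Int) - 1) := by omega
      have hc' : c < ((g.getD r.toNat []).length : Int) := by
        have hn' : r.toNat < g.length := by omega
        rw [List.getD_eq_getElem _ _ hn']
        have := hrect _ (List.getElem_mem hn')
        omega
      obtain ⟨v, hget⟩ := getCell_isSome g r c (by omega) (by omega) (by omega) hc'
      by_cases hv : v = 1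
      · subst hv
        rw [loopB_visited _ g co ncols r c rest h hget, dfsA_visited (nzCount g) r c g co h1 h2 hget]
        rw [show ((r, c) :: rest).length + 4 * nzCount g = rest.length + 4 * nzCount g + 1 by
          simp [List.length_cons]; omega]
      · exfalso
        have := nzCount_setCell g r c v (by omega) (by omega) hget hv
        omega
  | succ n ih =>
    intro g co ncols r c rest hn heq hrect hco
    by_cases h : r < 0 ∨ r ≥ (g.length : Int) ∨ c < 0 ∨ c ≥ ncols
    · rw [loopB_skip _ g co ncols r c rest h]
      by_cases h1 : r < 0 ∨ r > (g.length : Int) - 1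
      · rw [dfsA_oob (nzCount g) r c g co h1]
        rw [show ((r, c) :: rest).length + 4 * nzCount g = rest.length + 4 * nzCount g + 1 by
          simp [List.length_cons]; omega]
      · have h2 : c < 0 ∨ c > ((g.headD []).length : Int) - 1 := by omega
        rw [dfsA_oobc (nzCount g) r c g co h1 h2]
        rw [show ((r, c) :: rest).length + 4 * nzCount g = rest.length + 4 * nzCount g + 1 by
          simp [List.length_cons]; omega]
    · have h1 : ¬(r < 0 ∨ r > (g.length : Int) - 1) := by omega
      have h2 : ¬(c < 0 ∨ c > ((g.headD []).length : Int) - 1) := by omega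
      have hc' : c < ((g.getD r.toNat []).length : Int) := by
        have hn' : r.toNat < g.length := by omega
        rw [List.getD_eq_getElem _ _ hn']
        have := hrect _ (List.getElem_mem hn')
        omega
      obtain ⟨v, hget⟩ := getCell_isSome g r c (by omega) (by omega) (by omega) hc'
      by_cases hv : v = 1
      · subst hv
        rw [loopB_visited _ g co ncols r c rest h hget, dfsA_visited (nzCount g) r c g co h1 h2 hget]
        rw [show ((r, c) :: rest).length + 4 * nzCount g = rest.length + 4 * nzCount g + 1 by
          simp [List.length_cons]; omega]
      · obtain ⟨br, hbr⟩ : ∃ br, co.get? "br" = some br := by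
          rw [PySem.Dict.contains_eq_isSome_get?] at hco
          exact Option.isSome_iff_exists.mp hco
        rw [loopB_deep _ g co ncols r c rest v br h hget hv hbr,
          dfsA_deep (nzCount g) r c g co v br h1 h2 hget hv hbr]
        dsimp only
        set g1 := setCell g r c with hg1
        set co1 := (if r + c > br.1 + br.2 then co.insert "br" (r, c) else co) with hco1
        have hnz := nzCount_setCell g r c v (by omega) (by omega) hget hv
        rw [← hg1] at hnz
        have hmap1 : g1.map List.length = g.map List.length := hg1 ▸ setCell_map_length g r c
        have heq1 : ((g1.headD []).length : Int) = ncols := by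
          rw [headD_len_of_map_length g g1 hmap1]; exact heq
        have hrect1 : ∀ rw ∈ g1, ncols ≤ (rw.length : Int) := rows_ge_of_map_length g g1 ncols hmap1 hrect
        have hcob : co1.contains "br" = true := by
          rw [hco1]
          split
          · rw [PySem.Dict.contains_insert]; simp
          · exact hco
        rw [show ((r, c) :: rest).length + 4 * nzCount g
            = (((r - 1, c) :: (r + 1, c) :: (r, c + 1) :: (r, c - 1) :: rest).length)
              + 4 * nzCount g1 + 1 by simp [List.length_cons]; omega]
        rw [ih g1 co1 ncols (r - 1) c ((r + 1, c) :: (r, c + 1) :: (r, c - 1) :: rest)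
          (by omega) heq1 hrect1 hcob]
        dsimp only
        set t1 := dfsA (nzCount g1 + 1) (r - 1) c g1 co1 with ht1
        obtain ⟨a1, b1, c1⟩ := dfsA_preserve (nzCount g1 + 1) (r - 1) c g1 co1
        rw [← ht1] at a1 b1 c1
        have heq2 : ((t1.1.headD []).length : Int) = ncols := by
          rw [headD_len_of_map_length g1 t1.1 a1]; exact heq1
        rw [ih t1.1 t1.2.1 ncols (r + 1) c ((r, c + 1) :: (r, c - 1) :: rest)
          (by omega) heq2 (rows_ge_of_map_length g1 t1.1 ncols a1 hrect1) (c1.trans hcob)]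
        dsimp only
        set t2 := dfsA (nzCount t1.1 + 1) (r + 1) c t1.1 t1.2.1 with ht2
        obtain ⟨a2, b2, c2⟩ := dfsA_preserve (nzCount t1.1 + 1) (r + 1) c t1.1 t1.2.1
        rw [← ht2] at a2 b2 c2
        have heq3 : ((t2.1.headD []).length : Int) = ncols := by
          rw [headD_len_of_map_length t1.1 t2.1 a2]; exact heq2
        rw [ih t2.1 t2.2.1 ncols r (c + 1) ((r, c - 1) :: rest)
          (by omega) heq3 (rows_ge_of_map_length t1.1 t2.1 ncols a2
            (rows_ge_of_map_length g1 t1.1 ncols a1 hrect1)) (c2.trans (c1.trans hcob))]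
        dsimp only
        set t3 := dfsA (nzCount t2.1 + 1) r (c + 1) t2.1 t2.2.1 with ht3
        obtain ⟨a3, b3, c3⟩ := dfsA_preserve (nzCount t2.1 + 1) r (c + 1) t2.1 t2.2.1
        rw [← ht3] at a3 b3 c3
        have heq4 : ((t3.1.headD []).length : Int) = ncols := by
          rw [headD_len_of_map_length t2.1 t3.1 a3]; exact heq3
        rw [ih t3.1 t3.2.1 ncols r (c - 1) rest
          (by omega) heq4 (rows_ge_of_map_length t2.1 t3.1 ncols a3
            (rows_ge_of_map_length t1.1 t2.1 ncols a2
              (rows_ge_of_map_length g1 t1.1 ncols a1 hrect1)))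
          (c3.trans (c2.trans (c1.trans hcob)))]
        dsimp only
        set t4 := dfsA (nzCount t3.1 + 1) r (c - 1) t3.1 t3.2.1 with ht4
        -- now rewrite the dfsA side to the same canonical fuels
        rw [show dfsA (nzCount g) (r - 1) c g1 co1 = t1 by
          rw [ht1]; exact dfsA_fuel n g1 co1 (r - 1) c _ _ (by omega) (by omega) (by omega)]
        rw [show dfsA (nzCount g) (r + 1) c t1.1 t1.2.1 = t2 by
          rw [ht2]; exact dfsA_fuel n t1.1 t1.2.1 (r + 1) c _ _ (by omega) (by omega) (by omega)]
        rw [show dfsA (nzCount g) r (c + 1) t2.1 t2.2.1 = t3 by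
          rw [ht3]; exact dfsA_fuel n t2.1 t2.2.1 r (c + 1) _ _ (by omega) (by omega) (by omega)]
        rw [show dfsA (nzCount g) r (c - 1) t3.1 t3.2.1 = t4 by
          rw [ht4]; exact dfsA_fuel n t3.1 t3.2.1 r (c - 1) _ _ (by omega) (by omega) (by omega)]

-- ===== VERDICT (by name: the statement is the Claim_ definition above) =====
theorem searchDFS_spec : Claim_equal_searchDFS := by
  intro row col grid coords _hDom hPre
  unfold Spec_searchDFS searchDFS searchDFS_alt
  dsimp only
  by_cases h1 : row < 0 ∨ row > (grid.length : Int) - 1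
  · rw [dfsA_oob (nzCount grid) row col grid (PySem.Dict.ofList coords) h1, if_pos h1]
    simp
  rw [if_neg h1]
  by_cases h2 : col < 0 ∨ col > ((grid.headD []).length : Int) - 1
  · rw [dfsA_oobc (nzCount grid) row col grid (PySem.Dict.ofList coords) h1 h2, if_pos h2]
    simp
  rw [if_neg h2]
  have hinb : 0 ≤ row ∧ row < (grid.length : Int) ∧ 0 ≤ col ∧ col < ((grid.headD []).length : Int) := by
    omega
  obtain ⟨hcol, hdisj⟩ := hPre hinb
  obtain ⟨v, hget⟩ := getCell_isSome grid row col (by omega) (by omega) (by omega) hcol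
  rw [hget]
  dsimp only
  by_cases hv : v = 1
  · subst hv
    rw [dfsA_visited (nzCount grid) row col grid (PySem.Dict.ofList coords) h1 h2 hget,
      if_pos rfl]
    simp
  rw [if_neg hv]
  have hco : (PySem.Dict.ofList coords).contains "br" = true := by
    rcases hdisj with hd | hd
    · rw [hget] at hd; exact absurd (Option.some.injEq .. ▸ hd) (by simpa using hv)
    · exact hd.2
  obtain ⟨br, hbr⟩ : ∃ br, (PySem.Dict.ofList coords).get? "br" = some br := by
    rw [PySem.Dict.contains_eq_isSome_get?] at hco
    exact Option.isSome_iff_exists.mp hco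
  have hrect : ∀ rw ∈ grid, ((grid.headD []).length : Int) ≤ (rw.length : Int) := by
    rcases hdisj with hd | hd
    · rw [hget] at hd
      exact absurd (Option.some.injEq .. ▸ hd) (by simpa using hv)
    · intro rw hm
      exact_mod_cast hd.1 rw hm
  have hres2 : (dfsA (nzCount grid + 1) row col grid (PySem.Dict.ofList coords)).2.2 = true := by
    rw [dfsA_deep (nzCount grid) row col grid (PySem.Dict.ofList coords) v br h1 h2 hget hv hbr]
  rw [hres2]
  rw [show (1 + 4 * nzCount grid + 1)
      = ((row, col) :: ([] : List (Int × Int))).length + 4 * nzCount grid + 1 by simp]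
  rw [bridge (nzCount grid) grid (PySem.Dict.ofList coords) ((grid.headD []).length : Int)
    row col [] (le_refl _) rfl hrect hco]
  dsimp only
  rw [loopB_nil]
  simp
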